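-- pv_equiv track=rewrite | github.com/Sauvikk/practice_questions | Level3/Strings/Implement StrStr.py | solution
-- ===== SOURCE A (Python) =====
-- def solution(needle, haystack):
--           if not haystack or not needle:
--               return -1
--           sneedle = len(needle)
--           shaystack = len(haystack)
--           j = 0
--           while shaystack - j >= sneedle:
--               begin = j
--               i = 0
--               while i < sneedle and j < shaystack and needle[i] == haystack[j]:
--                   i += 1
--                   j += 1
--               if i == sneedle:
--                   return begin
--               j = begin + 1
--           return -1
-- ===== SOURCE B (Python) =====
-- def solution(needle, haystack):
--     if not needle:
--         return -1
--     return haystack.find(needle)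
-- ===== Notes on version B (the rewrite author's own statement) =====
-- stated objective: idiomatic
-- what changed: replaces the hand-written two-pointer scan with backtracking by a single call to Python's built-in str.find, keeping A's -1 answer for an empty needle
import Mathlib
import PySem

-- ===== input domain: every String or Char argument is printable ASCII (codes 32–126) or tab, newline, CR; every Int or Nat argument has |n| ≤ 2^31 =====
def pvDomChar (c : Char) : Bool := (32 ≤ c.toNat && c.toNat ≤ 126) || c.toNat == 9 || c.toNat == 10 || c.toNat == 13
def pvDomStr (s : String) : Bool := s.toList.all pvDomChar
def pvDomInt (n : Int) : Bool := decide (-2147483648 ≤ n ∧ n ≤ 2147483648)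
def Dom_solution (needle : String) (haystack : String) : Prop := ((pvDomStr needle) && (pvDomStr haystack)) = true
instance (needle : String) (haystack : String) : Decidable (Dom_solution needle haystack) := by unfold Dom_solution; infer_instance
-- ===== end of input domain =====

-- B replaces A's hand-written two-pointer scan with backtracking by a single call to the
-- standard-library substring search (Python str.find), keeping A's -1 answer for an empty needle.

-- ===== PORT A =====
-- inner while loop: 'while i < sneedle and j < shaystack and needle[i] == haystack[j]: i += 1; j += 1'
def innerA (nl hl : List Char) (i j : Nat) : Nat × Nat :=
  if h : i < nl.length ∧ j < hl.length ∧ nl[i]! = hl[j]! then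
    innerA nl hl (i + 1) (j + 1)
  else (i, j)
termination_by nl.length - i
decreasing_by exact Nat.sub_succ_lt_self _ _ h.1

-- outer while loop: 'while shaystack - j >= sneedle: begin = j; …; j = begin + 1'
def outerA (nl hl : List Char) (j : Nat) : Int :=
  if h : (nl.length : Int) ≤ (hl.length : Int) - (j : Int) then
    let b := j
    let p := innerA nl hl 0 j
    if p.1 = nl.length then (b : Int)
    else outerA nl hl (b + 1)
  else -1
termination_by hl.length + 1 - j
decreasing_by omega

def solution (needle : String) (haystack : String) : Int :=
  if haystack = "" ∨ needle = "" then -1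
  else outerA needle.toList haystack.toList 0

-- ===== PORT B =====
def solution_alt (needle : String) (haystack : String) : Int :=
  if needle = "" then -1
  else PySem.Str.find haystack needle

-- ===== PRECONDITION & SPEC =====
def Spec_solution (needle : String) (haystack : String) (out : Int) : Prop := out = solution_alt needle haystack
instance (needle : String) (haystack : String) (out : Int) : Decidable (Spec_solution needle haystack out) := by unfold Spec_solution; infer_instance

-- ===== CLAIM (what is proved, stated in full; the proofs are below) =====
def Claim_equal_solution : Prop := ∀ (needle : String) (haystack : String), Dom_solution needle haystack → Spec_solution needle haystack (solution needle haystack)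

-- ===== LEMMAS AND PROOFS =====

-- the inner loop reaches i = len(needle) iff the needle suffix at i is a prefix of the haystack suffix at j
theorem innerA_fst_eq_iff (nl hl : List Char) :
    ∀ (k i j : Nat), nl.length - i = k → i ≤ nl.length →
      ((innerA nl hl i j).1 = nl.length ↔ nl.drop i <+: hl.drop j) := by
  intro k
  induction k with
  | zero =>
    intro i j hk hi
    have hi' : i = nl.length := by omega
    rw [innerA, dif_neg (by omega)]
    subst hi'
    simp [List.drop_length, List.nil_prefix]
  | succ k ih =>
    intro i j hk hi
    have hilt : i < nl.length := by omega
    rw [innerA]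
    by_cases h : i < nl.length ∧ j < hl.length ∧ nl[i]! = hl[j]!
    · rw [dif_pos h, ih (i + 1) (j + 1) (by omega) (by omega)]
      obtain ⟨h1, h2, h3⟩ := h
      rw [← List.getElem_cons_drop h1, ← List.getElem_cons_drop h2,
          List.cons_prefix_cons]
      rw [getElem!_pos nl i h1, getElem!_pos hl j h2] at h3
      simp [h3]
    · rw [dif_neg h]
      simp only
      constructor
      · intro hc; omega
      · intro hpre
        exfalso
        rw [← List.getElem_cons_drop hilt] at hpre
        by_cases hj : j < hl.length
        · rw [← List.getElem_cons_drop hj, List.cons_prefix_cons] at hpre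
          exact h ⟨hilt, hj, by
            rw [getElem!_pos nl i hilt, getElem!_pos hl j hj]; exact hpre.1⟩
        · rw [List.drop_eq_nil_of_le (show hl.length ≤ j by omega)] at hpre
          have := hpre.length_le
          simp at this
          omega

-- find points at its unique first occurrence
theorem pv_find_unique (s sub : List Char) (r : Nat)
    (h1 : sub <+: s.drop r) (h2 : ∀ i < r, ¬ sub <+: s.drop i) :
    PySem.Chars.find s sub = (r : Int) := by
  have hin : sub <:+: s := h1.isInfix.trans (List.drop_suffix r s).isInfix
  have hnn : 0 ≤ PySem.Chars.find s sub := (PySem.Chars.find_nonneg_iff s sub).mpr hin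
  obtain ⟨hp, hmin⟩ := PySem.Chars.find_spec hnn
  rcases Nat.lt_trichotomy (PySem.Chars.find s sub).toNat r with hlt | heq | hgt
  · exact absurd hp (h2 _ hlt)
  · omega
  · exact absurd h1 (hmin r hgt)

theorem pv_find_of_prefix (s sub : List Char) (h : sub <+: s) : PySem.Chars.find s sub = 0 :=
  pv_find_unique s sub 0 (by simpa using h) (by omega)

theorem pv_find_cons (c : Char) (t sub : List Char) (h : ¬ sub <+: c :: t) :
    PySem.Chars.find (c :: t) sub =
      (if PySem.Chars.find t sub = -1 then -1 else PySem.Chars.find t sub + 1) := by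
  by_cases hf : PySem.Chars.find t sub = -1
  · rw [if_pos hf]
    rw [PySem.Chars.find_eq_neg_one_iff] at hf ⊢
    intro hin
    rcases List.infix_cons_iff.mp hin with hpre | hinf
    · exact h hpre
    · exact hf hinf
  · rw [if_neg hf]
    have h0 : 0 ≤ PySem.Chars.find t sub := by
      have := PySem.Chars.neg_one_le_find t sub; omega
    obtain ⟨hp, hmin⟩ := PySem.Chars.find_spec h0
    have := pv_find_unique (c :: t) sub ((PySem.Chars.find t sub).toNat + 1)
      (by rw [List.drop_succ_cons]; exact hp)
      (by
        intro i hi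
        cases i with
        | zero => simpa using h
        | succ i' => rw [List.drop_succ_cons]; exact hmin i' (by omega))
    rw [this]
    push_cast
    rw [Int.toNat_of_nonneg h0]

-- the outer loop from position j computes the first match at or after j
theorem outerA_eq (nl hl : List Char) (hm : nl ≠ []) :
    ∀ (k j : Nat), hl.length + 1 - j = k → j ≤ hl.length →
      outerA nl hl j =
        (if PySem.Chars.find (hl.drop j) nl = -1 then -1
         else (j : Int) + PySem.Chars.find (hl.drop j) nl) := by
  intro k
  induction k with
  | zero => intro j hk hj; omega
  | succ k ih =>
    intro j hk hj
    rw [outerA]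
    by_cases h : (nl.length : Int) ≤ (hl.length : Int) - (j : Int)
    · rw [dif_pos h]
      have hin := innerA_fst_eq_iff nl hl nl.length 0 j rfl (by omega)
      simp only [List.drop_zero] at hin
      by_cases hp : (innerA nl hl 0 j).1 = nl.length
      · simp only [hp, if_true]
        rw [pv_find_of_prefix _ _ (hin.mp hp)]
        norm_num
      · simp only [if_neg hp]
        have hnp : ¬ nl <+: hl.drop j := fun hh => hp (hin.mpr hh)
        have hm1 : 0 < nl.length := List.length_pos_of_ne_nil hm
        have hjlt : j < hl.length := by omega
        rw [ih (j + 1) (by omega) (by omega)]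
        have hdrop : hl.drop j = hl[j] :: hl.drop (j + 1) := (List.getElem_cons_drop hjlt).symm
        rw [hdrop] at hnp
        rw [hdrop, pv_find_cons _ _ _ hnp]
        by_cases hf : PySem.Chars.find (hl.drop (j + 1)) nl = -1
        · simp [hf]
        · have h0 : 0 ≤ PySem.Chars.find (hl.drop (j + 1)) nl := by
            have := PySem.Chars.neg_one_le_find (hl.drop (j + 1)) nl; omega
          rw [if_neg hf, if_neg (by omega), if_neg hf]
          push_cast
          ring
    · rw [dif_neg h]
      have : PySem.Chars.find (hl.drop j) nl = -1 := by
        rw [PySem.Chars.find_eq_neg_one_iff]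
        intro hin
        have := hin.length_le
        rw [List.length_drop] at this
        omega
      rw [this]
      simp

-- ===== VERDICT (by name: the statement is the Claim_ definition above) =====
theorem solution_spec : Claim_equal_solution := by
  intro needle haystack _
  unfold Spec_solution solution solution_alt
  by_cases hn : needle = ""
  · simp [hn]
  · rw [if_neg hn]
    have hnl : needle.toList ≠ [] := fun hc => hn (by
      rcases needle with ⟨l⟩; simp_all)
    by_cases hh : haystack = ""
    · rw [if_pos (Or.inl hh), PySem.Str.find_eq, hh]
      have : PySem.Chars.find ([] : List Char) needle.toList = -1 := by
        rw [PySem.Chars.find_eq_neg_one_iff]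
        intro hin
        exact hnl (List.eq_nil_of_infix_nil hin)
      simp [this]
    · rw [if_neg (by simp [hh, hn]), PySem.Str.find_eq]
      rw [outerA_eq needle.toList haystack.toList hnl (haystack.toList.length + 1) 0 rfl (by omega)]
      simp only [List.drop_zero, Nat.cast_zero, zero_add]
      by_cases hf : PySem.Chars.find haystack.toList needle.toList = -1 <;> simp [hf]
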